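-- pv_equiv track=rewrite | github.com/StangerSerg/Test | test_task.py | list_handling_long
-- ===== SOURCE A (Python) =====
-- def list_handling_long(lst):
--     '''
--     Та же самая функция, что и list_handling, но без использования встроенных функций
--
--     Обработка списка чисел:
--     1. Удаление дублирующихся значений
--     2. Удаление всех нечётных значений
--     3. Сортирует значения по убыванию
--
--     :param lst: список чисел
--     :return: list
--     '''
--     #проверка входящих данных
--     if not all([type(x) in (int,float) for x in lst]):
--         raise ValueError("Все элементы списка должны быть числами")
--
--     #удаляем из списка дублирующиеся и нечетные элементы
--     res = []
--     for value in lst: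
--         if value not in res:
--             if value % 2 == 0:
--                res.append(value)
--
--     #сортируем получившийся список
--     for i in range(len(res)-1):
--         for j in range(len(res)-1-i):
--             if res[j] < res[j+1]:
--                 res[j], res[j+1] = res[j+1], res[j]
--
--     return res
-- ===== SOURCE B (Python) =====
-- def list_handling_long(lst):
--     '''Dedup, keep evens, sort descending — sort-first then one-pass adjacent dedup.'''
--     if not all([type(x) in (int, float) for x in lst]):
--         raise ValueError("Все элементы списка должны быть числами")
--     res = []
--     for value in sorted(lst, reverse=True):
--         if value % 2 == 0 and (not res or res[-1] != value):
--             res.append(value)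
--     return res
-- ===== Notes on version B (the rewrite author's own statement) =====
-- stated objective: faster
-- what changed: A dedups by O(n) membership scans then bubble-sorts (O(n^2) each); B sorts the whole input descending once and does a single pass keeping even values that differ from the last kept one (sort-first adjacent dedup).
import Mathlib
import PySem

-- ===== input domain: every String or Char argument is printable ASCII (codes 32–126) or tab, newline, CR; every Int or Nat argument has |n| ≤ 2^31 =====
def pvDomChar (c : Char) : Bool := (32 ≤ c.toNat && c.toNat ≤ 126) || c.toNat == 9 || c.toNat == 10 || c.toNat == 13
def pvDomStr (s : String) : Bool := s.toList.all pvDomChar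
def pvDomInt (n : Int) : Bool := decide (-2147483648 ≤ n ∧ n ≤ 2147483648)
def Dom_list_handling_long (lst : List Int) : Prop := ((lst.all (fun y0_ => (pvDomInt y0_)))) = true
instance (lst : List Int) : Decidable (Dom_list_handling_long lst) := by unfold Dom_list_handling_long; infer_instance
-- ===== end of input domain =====

-- B sorts once then keeps even values that differ from the last kept one (one pass), instead of A's membership-scan dedup followed by bubble sort; return-value equivalence (A's number-type validation is trivial on List Int).

-- ===== PORT A =====
-- one step of A's inner bubble loop: `if res[j] < res[j+1]: swap` (indices are always in range when called by the loops below)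
def pvStep (r : List Int) (j : Nat) : List Int :=
  if r.getD j 0 < r.getD (j+1) 0 then (r.set j (r.getD (j+1) 0)).set (j+1) (r.getD j 0) else r

-- A's inner loop: `for j in range(n): …`
def pvInner (r : List Int) (n : Nat) : List Int := (List.range n).foldl pvStep r

def list_handling_long (lst : List Int) : List Int :=
  -- for value in lst: if value not in res: if value % 2 == 0: res.append(value)
  let res := lst.foldl (fun res v =>
    if v ∈ res then res
    else if PySem.Int.mod v 2 = 0 then res ++ [v] else res) []
  -- for i in range(len(res)-1): for j in range(len(res)-1-i): swap-if  (len(res) never changes)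
  (List.range (res.length - 1)).foldl (fun r i => pvInner r (r.length - 1 - i)) res

-- ===== PORT B =====
def list_handling_long_alt (lst : List Int) : List Int :=
  (PySem.List.sorted lst (fun x => x) true).foldl (fun res v =>
    if PySem.Int.mod v 2 = 0 ∧ (res = [] ∨ res.getLast? ≠ some v) then res ++ [v] else res) []

-- ===== PRECONDITION & SPEC =====
def Spec_list_handling_long (lst : List Int) (out : List Int) : Prop := out = list_handling_long_alt lst
instance (lst : List Int) (out : List Int) : Decidable (Spec_list_handling_long lst out) := by unfold Spec_list_handling_long; infer_instance

-- ===== CLAIM (what is proved, stated in full; the proofs are below) =====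
def Claim_equal_list_handling_long : Prop := ∀ (lst : List Int), Dom_list_handling_long lst → Spec_list_handling_long lst (list_handling_long lst)

-- ===== LEMMAS AND PROOFS =====

-- structural version of one bubble pass (proof-side only)
def pvBp : List Int → List Int
  | [] => []
  | [a] => [a]
  | a :: b :: t => if a < b then b :: pvBp (a :: t) else a :: pvBp (b :: t)

theorem pvStep_cons (x : Int) (r : List Int) (j : Nat) :
    pvStep (x :: r) (j+1) = x :: pvStep r j := by
  simp [pvStep, List.getD]
  split <;> rfl

theorem pvFoldl_shift (L : List Nat) (x : Int) (r : List Int) :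
    L.foldl (fun r j => pvStep r (j+1)) (x :: r) = x :: L.foldl pvStep r := by
  induction L generalizing r with
  | nil => rfl
  | cons j t ih => simp [List.foldl_cons, pvStep_cons, ih]

theorem pvInner_cons2 (a b : Int) (t : List Int) (n : Nat) :
    pvInner (a :: b :: t) (n+1)
      = if a < b then b :: pvInner (a :: t) n else a :: pvInner (b :: t) n := by
  unfold pvInner
  rw [List.range_succ_eq_map]
  simp only [List.foldl_cons, List.foldl_map]
  have h0 : pvStep (a :: b :: t) 0 = if a < b then b :: a :: t else a :: b :: t := by
    simp [pvStep, List.getD]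
  rw [h0]
  split <;> rw [show (fun (r : List Int) (j : Nat) => pvStep r (j+1)) = (fun r j => pvStep r (j+1)) from rfl] <;> exact pvFoldl_shift _ _ _

theorem pvInner_local (n : Nat) (r : List Int) (h : n + 1 ≤ r.length) :
    pvInner r n = pvBp (r.take (n+1)) ++ r.drop (n+1) := by
  induction n generalizing r with
  | zero =>
    match r, h with
    | a :: t, _ => simp [pvInner, pvBp]
  | succ n ih =>
    match r, h with
    | a :: b :: t, h =>
      have h' : n + 1 ≤ (a :: t).length := by simp at h ⊢; omega
      rw [pvInner_cons2]
      have hbt : n + 1 ≤ (b :: t).length := by simp at h ⊢; omega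
      rw [ih _ h', ih _ hbt]
      simp only [List.take_succ_cons, List.drop_succ_cons, pvBp]
      split <;> simp

theorem pvBp_perm (l : List Int) : (pvBp l).Perm l := by
  induction l using pvBp.induct with
  | case1 => simp [pvBp]
  | case2 a => simp [pvBp]
  | case3 a b t hab ih =>
    simp only [pvBp, if_pos hab]
    exact (ih.cons b).trans (List.Perm.swap a b t)
  | case4 a b t hab ih =>
    simp only [pvBp, if_neg hab]
    exact ih.cons a

theorem pvBp_min (l : List Int) (h : l ≠ []) :
    ∃ w m, pvBp l = w ++ [m] ∧ ∀ x ∈ l, m ≤ x := by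
  induction l using pvBp.induct with
  | case1 => exact absurd rfl h
  | case2 a => exact ⟨[], a, by simp [pvBp], by simp⟩
  | case3 a b t hab ih =>
    obtain ⟨w, m, hw, hm⟩ := ih (by simp)
    refine ⟨b :: w, m, by simp [pvBp, if_pos hab, hw], ?_⟩
    intro x hx
    rcases List.mem_cons.1 hx with rfl | hx'
    · have := hm x (by simp); omega
    · rcases List.mem_cons.1 hx' with rfl | hx'' 
      · have := hm a (by simp); omega
      · exact hm x (by simp [hx''])
  | case4 a b t hab ih =>
    obtain ⟨w, m, hw, hm⟩ := ih (by simp)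
    refine ⟨a :: w, m, by simp [pvBp, if_neg hab, hw], ?_⟩
    intro x hx
    rcases List.mem_cons.1 hx with rfl | hx'
    · have := hm b (by simp); omega
    · exact hm x hx'

theorem pvBubble_inv (r0 : List Int) (k : Nat) (hk : k ≤ r0.length) :
    ((List.range k).foldl (fun r i => pvInner r (r.length - 1 - i)) r0).Perm r0 ∧
    (((List.range k).foldl (fun r i => pvInner r (r.length - 1 - i)) r0).drop (r0.length - k)).Pairwise (· ≥ ·) ∧
    (∀ x ∈ ((List.range k).foldl (fun r i => pvInner r (r.length - 1 - i)) r0).take (r0.length - k),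
      ∀ y ∈ ((List.range k).foldl (fun r i => pvInner r (r.length - 1 - i)) r0).drop (r0.length - k), y ≤ x) := by
  induction k with
  | zero =>
    refine ⟨List.Perm.refl _, ?_, ?_⟩ <;> simp [List.drop_length]
  | succ k ih =>
    obtain ⟨hperm, hpw, hdom⟩ := ih (by omega)
    set r := (List.range k).foldl (fun r i => pvInner r (r.length - 1 - i)) r0 with hr
    have hlen : r.length = r0.length := hperm.length_eq
    set L := r0.length with hL
    have hfold : (List.range (k+1)).foldl (fun r i => pvInner r (r.length - 1 - i)) r0
        = pvInner r (r.length - 1 - k) := by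
      rw [List.range_succ, List.foldl_append, List.foldl_cons, List.foldl_nil]
    have hn : (r.length - 1 - k) + 1 = L - k := by omega
    have hloc : pvInner r (r.length - 1 - k) = pvBp (r.take (L - k)) ++ r.drop (L - k) := by
      rw [pvInner_local (r.length - 1 - k) r (by omega), hn]
    have hrne : r ≠ [] := by
      intro hnil
      rw [hnil] at hlen
      simp at hlen
      omega
    have htne : r.take (L - k) ≠ [] := by
      simp [List.take_eq_nil_iff, hrne]; omega
    obtain ⟨w, m, hwm, hmin⟩ := pvBp_min _ htne
    have hbperm : (w ++ [m]).Perm (r.take (L - k)) := hwm ▸ pvBp_perm _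
    have hwlen : w.length = L - (k+1) := by
      have h := hbperm.length_eq
      simp at h
      omega
    have hres : (List.range (k+1)).foldl (fun r i => pvInner r (r.length - 1 - i)) r0
        = w ++ m :: r.drop (L - k) := by
      rw [hfold, hloc, hwm]; simp
    have hmmem : m ∈ r.take (L - k) := hbperm.mem_iff.1 (by simp)
    refine ⟨?_, ?_, ?_⟩
    · rw [hres]
      have : (w ++ m :: r.drop (L - k)).Perm (r.take (L-k) ++ r.drop (L-k)) := by
        have := hbperm.append_right (r.drop (L - k))
        simpa using this
      rw [List.take_append_drop] at this
      exact this.trans hperm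
    · rw [hres]
      have hd : (w ++ m :: r.drop (L - k)).drop (L - (k+1)) = m :: r.drop (L - k) := by
        rw [← hwlen, List.drop_left]
      rw [hd]
      refine List.Pairwise.cons ?_ hpw
      intro y hy
      exact hdom m hmmem y hy
    · rw [hres]
      have hd : (w ++ m :: r.drop (L - k)).drop (L - (k+1)) = m :: r.drop (L - k) := by
        rw [← hwlen, List.drop_left]
      have ht : (w ++ m :: r.drop (L - k)).take (L - (k+1)) = w := by
        rw [← hwlen, List.take_left]
      rw [hd, ht]
      intro x hx y hy
      have hxt : x ∈ r.take (L - k) := hbperm.mem_iff.1 (by simp [hx])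
      rcases List.mem_cons.1 hy with rfl | hy'
      · exact hmin x hxt
      · exact hdom x hxt y hy'

theorem pvBubble_sorts (r0 : List Int) :
    ((List.range (r0.length - 1)).foldl (fun r i => pvInner r (r.length - 1 - i)) r0).Perm r0 ∧
    ((List.range (r0.length - 1)).foldl (fun r i => pvInner r (r.length - 1 - i)) r0).Pairwise (· ≥ ·) := by
  obtain ⟨hperm, hpw, hdom⟩ := pvBubble_inv r0 (r0.length - 1) (by omega)
  refine ⟨hperm, ?_⟩
  rcases hres : (List.range (r0.length - 1)).foldl (fun r i => pvInner r (r.length - 1 - i)) r0 with _ | ⟨h, t⟩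
  · simp
  · rw [hres] at hpw hdom
    by_cases hL : r0.length = 0
    · have : r0 = [] := List.length_eq_zero_iff.1 hL
      subst this
      simp at hres
    · have h1 : r0.length - (r0.length - 1) = 1 := by omega
      rw [h1] at hpw hdom
      simp only [List.drop_succ_cons, List.drop_zero, List.take_succ_cons, List.take_zero] at hpw hdom
      exact List.Pairwise.cons (fun y hy => hdom h (by simp) y hy) hpw

theorem pvPass1_inv (l : List Int) (acc : List Int) (hnd : acc.Nodup) :
    (l.foldl (fun res v => if v ∈ res then res
      else if PySem.Int.mod v 2 = 0 then res ++ [v] else res) acc).Nodup ∧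
    (∀ x, x ∈ l.foldl (fun res v => if v ∈ res then res
      else if PySem.Int.mod v 2 = 0 then res ++ [v] else res) acc ↔
        x ∈ acc ∨ (x ∈ l ∧ PySem.Int.mod x 2 = 0)) := by
  induction l generalizing acc with
  | nil => simpa using hnd
  | cons v t ih =>
    simp only [List.foldl_cons]
    by_cases hv : v ∈ acc
    · rw [if_pos hv]
      obtain ⟨h1, h2⟩ := ih acc hnd
      refine ⟨h1, fun x => ?_⟩
      rw [h2 x]
      constructor
      · rintro (h | ⟨h, h'⟩)
        · exact Or.inl h
        · exact Or.inr ⟨List.mem_cons_of_mem _ h, h'⟩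
      · rintro (h | ⟨h, he⟩)
        · exact Or.inl h
        · rcases List.mem_cons.1 h with rfl | h'
          · exact Or.inl hv
          · exact Or.inr ⟨h', he⟩
    · rw [if_neg hv]
      by_cases he : PySem.Int.mod v 2 = 0
      · rw [if_pos he]
        have hnd' : (acc ++ [v]).Nodup := by
          simp only [List.nodup_append, List.nodup_singleton]
          exact ⟨hnd, trivial, by rintro a ha b hb; simp at hb; subst hb; exact fun h => hv (h ▸ ha)⟩
        obtain ⟨h1, h2⟩ := ih _ hnd'
        refine ⟨h1, fun x => ?_⟩
        rw [h2 x]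
        simp only [List.mem_append, List.mem_cons, List.not_mem_nil, or_false]
        constructor
        · rintro ((h | rfl) | ⟨h, h'⟩)
          · exact Or.inl h
          · exact Or.inr ⟨Or.inl rfl, he⟩
          · exact Or.inr ⟨Or.inr h, h'⟩
        · rintro (h | ⟨(rfl | h), h'⟩)
          · exact Or.inl (Or.inl h)
          · exact Or.inl (Or.inr rfl)
          · exact Or.inr ⟨h, h'⟩
      · rw [if_neg he]
        obtain ⟨h1, h2⟩ := ih acc hnd
        refine ⟨h1, fun x => ?_⟩
        rw [h2 x]
        constructor
        · rintro (h | ⟨h, h'⟩)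
          · exact Or.inl h
          · exact Or.inr ⟨List.mem_cons_of_mem _ h, h'⟩
        · rintro (h | ⟨h, h'⟩)
          · exact Or.inl h
          · rcases List.mem_cons.1 h with rfl | hh
            · exact absurd h' he
            · exact Or.inr ⟨hh, h'⟩

theorem pvEq_of_pairwise_gt (l1 l2 : List Int) (h1 : l1.Pairwise (· > ·))
    (h2 : l2.Pairwise (· > ·)) (hm : ∀ x, x ∈ l1 ↔ x ∈ l2) : l1 = l2 := by
  induction l1 generalizing l2 with
  | nil =>
    cases l2 with
    | nil => rfl
    | cons b t2 => exact absurd ((hm b).2 (by simp)) (by simp)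
  | cons a t1 ih =>
    cases l2 with
    | nil => exact absurd ((hm a).1 (by simp)) (by simp)
    | cons b t2 =>
      have hab : a = b := by
        have ha : a ∈ b :: t2 := (hm a).1 (by simp)
        have hb : b ∈ a :: t1 := (hm b).2 (by simp)
        rcases List.mem_cons.1 ha with h | h
        · exact h
        · have hba : b > a := (List.pairwise_cons.1 h2).1 a h
          rcases List.mem_cons.1 hb with h' | h'
          · omega
          · have : a > b := (List.pairwise_cons.1 h1).1 b h'
            omega
      subst hab
      have ht : ∀ x, x ∈ t1 ↔ x ∈ t2 := by
        intro x
        constructor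
        · intro hx
          have hax : a > x := (List.pairwise_cons.1 h1).1 x hx
          rcases List.mem_cons.1 ((hm x).1 (List.mem_cons_of_mem _ hx)) with rfl | h
          · omega
          · exact h
        · intro hx
          have hax : a > x := (List.pairwise_cons.1 h2).1 x hx
          rcases List.mem_cons.1 ((hm x).2 (List.mem_cons_of_mem _ hx)) with rfl | h
          · omega
          · exact h
      rw [ih (List.pairwise_cons.1 h1).2 (l2 := t2) (List.pairwise_cons.1 h2).2 ht]

theorem pvLast_le (acc : List Int) (h : acc.Pairwise (· > ·)) (la : Int)
    (hla : acc.getLast? = some la) : ∀ a ∈ acc, la ≤ a := by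
  induction acc with
  | nil => simp at hla
  | cons a t ih =>
    cases t with
    | nil =>
      simp at hla
      subst hla
      simp
    | cons b t' =>
      have hla' : (b :: t').getLast? = some la := by
        simpa using hla
      have hmem : la ∈ b :: t' := List.mem_of_getLast? hla'
      intro x hx
      rcases List.mem_cons.1 hx with rfl | hx'
      · have := (List.pairwise_cons.1 h).1 la hmem
        omega
      · exact ih (List.pairwise_cons.1 h).2 hla' x hx'

theorem pvBFold_inv (l : List Int) (acc : List Int)
    (hl : l.Pairwise (fun a b => b ≤ a)) (hacc : acc.Pairwise (· > ·))
    (hdom : ∀ la, acc.getLast? = some la → ∀ x ∈ l, x ≤ la) :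
    (l.foldl (fun res v => if PySem.Int.mod v 2 = 0 ∧ (res = [] ∨ res.getLast? ≠ some v)
        then res ++ [v] else res) acc).Pairwise (· > ·) ∧
    (∀ x, x ∈ l.foldl (fun res v => if PySem.Int.mod v 2 = 0 ∧ (res = [] ∨ res.getLast? ≠ some v)
        then res ++ [v] else res) acc ↔ x ∈ acc ∨ (x ∈ l ∧ PySem.Int.mod x 2 = 0)) := by
  induction l generalizing acc with
  | nil => simpa using hacc
  | cons v t ih =>
    have hvt : ∀ x ∈ t, x ≤ v := (List.pairwise_cons.1 hl).1
    have htpw : t.Pairwise (fun a b => b ≤ a) := (List.pairwise_cons.1 hl).2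
    simp only [List.foldl_cons]
    by_cases hg : PySem.Int.mod v 2 = 0 ∧ (acc = [] ∨ acc.getLast? ≠ some v)
    · rw [if_pos hg]
      obtain ⟨he, hne⟩ := hg
      have hgt : ∀ a ∈ acc, a > v := by
        intro a ha
        rcases hne with rfl | hne
        · simp at ha
        · cases hacc' : acc.getLast? with
          | none => rw [List.getLast?_eq_none_iff] at hacc'; subst hacc'; simp at ha
          | some la =>
            have h1 : v ≤ la := hdom la hacc' v (by simp)
            have h2 : la ≤ a := pvLast_le acc hacc la hacc' a ha
            have h3 : la ≠ v := fun h => hne (h ▸ hacc')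
            omega
      have hacc' : (acc ++ [v]).Pairwise (· > ·) := by
        rw [List.pairwise_append]
        exact ⟨hacc, by simp, by intro a ha b hb; simp at hb; subst hb; exact hgt a ha⟩
      have hdom' : ∀ la, (acc ++ [v]).getLast? = some la → ∀ x ∈ t, x ≤ la := by
        intro la hla x hx
        simp at hla
        subst hla
        exact hvt x hx
      obtain ⟨h1, h2⟩ := ih (acc ++ [v]) htpw hacc' hdom'
      refine ⟨h1, fun x => ?_⟩
      rw [h2 x]
      simp only [List.mem_append, List.mem_cons, List.not_mem_nil, or_false]
      constructor
      · rintro ((h | rfl) | ⟨h, h'⟩)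
        · exact Or.inl h
        · exact Or.inr ⟨Or.inl rfl, he⟩
        · exact Or.inr ⟨Or.inr h, h'⟩
      · rintro (h | ⟨(rfl | h), h'⟩)
        · exact Or.inl (Or.inl h)
        · exact Or.inl (Or.inr rfl)
        · exact Or.inr ⟨h, h'⟩
    · rw [if_neg hg]
      have hdom' : ∀ la, acc.getLast? = some la → ∀ x ∈ t, x ≤ la := by
        intro la hla x hx
        exact hdom la hla x (List.mem_cons_of_mem _ hx)
      obtain ⟨h1, h2⟩ := ih acc htpw hacc hdom'
      refine ⟨h1, fun x => ?_⟩
      rw [h2 x]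
      constructor
      · rintro (h | ⟨h, h'⟩)
        · exact Or.inl h
        · exact Or.inr ⟨List.mem_cons_of_mem _ h, h'⟩
      · rintro (h | ⟨h, h'⟩)
        · exact Or.inl h
        · rcases List.mem_cons.1 h with rfl | hh
          · -- guard failed though x even: so acc nonempty with last = x; hence x ∈ acc
            push_neg at hg
            rcases (hg h') with ⟨hne, hlast⟩
            left
            have : acc.getLast? = some x := not_not.1 (by simpa using hlast)
            exact List.mem_of_getLast? this
          · exact Or.inr ⟨hh, h'⟩

-- ===== VERDICT (by name: the statement is the Claim_ definition above) =====
theorem list_handling_long_spec : Claim_equal_list_handling_long := by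
  unfold Claim_equal_list_handling_long Spec_list_handling_long
  intro lst _
  show (let res := lst.foldl (fun res v =>
      if v ∈ res then res
      else if PySem.Int.mod v 2 = 0 then res ++ [v] else res) []
    (List.range (res.length - 1)).foldl (fun r i => pvInner r (r.length - 1 - i)) res)
    = list_handling_long_alt lst
  set P := lst.foldl (fun res v =>
    if v ∈ res then res
    else if PySem.Int.mod v 2 = 0 then res ++ [v] else res) [] with hP
  obtain ⟨hPnd, hPm⟩ := pvPass1_inv lst [] List.nodup_nil
  rw [← hP] at hPnd hPm
  set A := (List.range (P.length - 1)).foldl (fun r i => pvInner r (r.length - 1 - i)) P with hA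
  obtain ⟨hAperm, hApw⟩ := pvBubble_sorts P
  rw [← hA] at hAperm hApw
  have hAnd : A.Nodup := hAperm.nodup_iff.2 hPnd
  have hAgt : A.Pairwise (· > ·) := (hApw.and hAnd).imp (by intro a b ⟨h1, h2⟩; omega)
  have hAm : ∀ x, x ∈ A ↔ x ∈ lst ∧ PySem.Int.mod x 2 = 0 := by
    intro x
    rw [hAperm.mem_iff, hPm x]
    simp
  -- B side
  set S := PySem.List.sorted lst (fun x => x) true with hS
  have hSpw : S.Pairwise (fun a b => b ≤ a) := PySem.List.sorted_pairwise_rev lst (fun x => x)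
  obtain ⟨hBgt, hBm⟩ := pvBFold_inv S [] hSpw (by simp) (by intro la hla; simp at hla)
  have hBm' : ∀ x, x ∈ list_handling_long_alt lst ↔ x ∈ lst ∧ PySem.Int.mod x 2 = 0 := by
    intro x
    show x ∈ S.foldl _ [] ↔ _
    rw [hBm x]
    simp [hS, PySem.List.mem_sorted]
  exact pvEq_of_pairwise_gt A (list_handling_long_alt lst) hAgt hBgt
    (fun x => (hAm x).trans (hBm' x).symm)
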